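-- pv_equiv track=rewrite | github.com/BSadioDiallo/Alfy-BootCamp | func_and_helper_func.py | monotonicity_down_handler
-- ===== SOURCE A (Python) =====
-- def monotonicity_down_handler(sequence):
--         one = 0
--         two = 0
--         down = False
--         strongDown = True
--
--         for i in range( len(sequence) -1 ):
--             j = i + 1
--             one = sequence[i]
--             two = sequence[j]
--
--             if one > two:
--                 down = True
--             elif one == two:
--                 if one >= two:
--                     down = True
--                 strongDown = False
--             else:
--                 down = False
--                 strongDown = False
--                 break
--
--         return [ down, strongDown ]
-- ===== SOURCE B (Python) =====
-- def monotonicity_down_handler(sequence):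
--     pairs = list(zip(sequence, sequence[1:]))
--     down = len(pairs) > 0 and all(a >= b for a, b in pairs)
--     strongDown = all(a > b for a, b in pairs)
--     return [down, strongDown]
-- ===== Notes on version B (the rewrite author's own statement) =====
-- stated objective: simpler
-- what changed: Replaces the stateful early-exit loop that reassigns down/strongDown each step with two independent boolean reductions over adjacent pairs (down = nonempty and all >=, strongDown = all >), which coincide with A's values including the len<2 case.
import Mathlib
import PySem

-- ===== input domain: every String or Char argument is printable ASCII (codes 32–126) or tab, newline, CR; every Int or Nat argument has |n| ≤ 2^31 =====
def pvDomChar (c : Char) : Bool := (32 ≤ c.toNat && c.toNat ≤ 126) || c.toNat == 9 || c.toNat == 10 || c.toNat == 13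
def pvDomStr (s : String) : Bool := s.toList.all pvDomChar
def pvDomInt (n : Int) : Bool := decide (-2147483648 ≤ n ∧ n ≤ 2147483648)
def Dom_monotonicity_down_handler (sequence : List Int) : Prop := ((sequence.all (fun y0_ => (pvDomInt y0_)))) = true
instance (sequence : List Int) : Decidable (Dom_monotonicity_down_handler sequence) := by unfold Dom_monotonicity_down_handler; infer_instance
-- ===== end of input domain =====

-- B replaces A's stateful early-exit loop by two independent all-pairs reductions (simpler decomposition).
-- ===== PORT A =====
-- Loop of A: i runs over range(len-1); n counts remaining iterations. Indices i, i+1 are always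
-- in range, so sequence[i] is ported exactly as getD _ 0. The 'break' is the early return.
def mdhLoopA (s : List Int) (i n : Nat) (down strongDown : Bool) : Bool × Bool :=
  match n with
  | 0 => (down, strongDown)
  | n + 1 =>
    let one := s.getD i 0
    let two := s.getD (i + 1) 0
    if one > two then
      mdhLoopA s (i + 1) n true strongDown
    else if one == two then
      mdhLoopA s (i + 1) n (if one ≥ two then true else down) false
    else
      (false, false)

def monotonicity_down_handler (sequence : List Int) : List Bool :=
  let r := mdhLoopA sequence 0 (sequence.length - 1) false true
  [r.1, r.2]

-- ===== PORT B =====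
def monotonicity_down_handler_alt (sequence : List Int) : List Bool :=
  let pairs := sequence.zip (sequence.drop 1)
  let down := decide (0 < pairs.length) && pairs.all (fun p => decide (p.1 ≥ p.2))
  let strongDown := pairs.all (fun p => decide (p.1 > p.2))
  [down, strongDown]

-- ===== PRECONDITION & SPEC =====
def Spec_monotonicity_down_handler (sequence : List Int) (out : List Bool) : Prop := out = monotonicity_down_handler_alt sequence
instance (sequence : List Int) (out : List Bool) : Decidable (Spec_monotonicity_down_handler sequence out) := by unfold Spec_monotonicity_down_handler; infer_instance

-- ===== CLAIM (what is proved, stated in full; the proofs are below) =====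
def Claim_equal_monotonicity_down_handler : Prop := ∀ (sequence : List Int), Dom_monotonicity_down_handler sequence → Spec_monotonicity_down_handler sequence (monotonicity_down_handler sequence)

-- ===== LEMMAS AND PROOFS =====

-- ===== VERDICT (by name: the statement is the Claim_ definition above) =====
lemma mdhLoopA_spec (s : List Int) : ∀ (n i : Nat) (d sd : Bool), i + n + 1 = s.length →
    mdhLoopA s i n d sd =
      ((if n = 0 then d else ((s.drop i).zip (s.drop (i + 1))).all (fun p => decide (p.1 ≥ p.2))),
       sd && ((s.drop i).zip (s.drop (i + 1))).all (fun p => decide (p.1 > p.2))) := by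
  intro n
  induction n with
  | zero =>
    intro i d sd h
    have : s.drop (i + 1) = [] := List.drop_eq_nil_of_le (by omega)
    simp [mdhLoopA, this]
  | succ n ih =>
    intro i d sd h
    have hi : i < s.length := by omega
    have hi1 : i + 1 < s.length := by omega
    have hdi : s.drop i = s[i] :: s.drop (i + 1) := List.drop_eq_getElem_cons hi
    have hdi1 : s.drop (i + 1) = s[i + 1] :: s.drop (i + 2) := List.drop_eq_getElem_cons hi1
    have hzip : (s.drop i).zip (s.drop (i + 1))
        = (s[i], s[i + 1]) :: ((s.drop (i + 1)).zip (s.drop (i + 2))) := by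
      rw [hdi, hdi1]; rfl
    have hg1 : s[i]? = some s[i] := List.getElem?_eq_getElem hi
    have hg2 : s[i + 1]? = some s[i + 1] := List.getElem?_eq_getElem hi1
    have hrec : i + 1 + n + 1 = s.length := by omega
    by_cases hgt : s[i] > s[i + 1]
    · rw [show mdhLoopA s i (n + 1) d sd = mdhLoopA s (i + 1) n true sd by
        simp [mdhLoopA, hg1, hg2, hgt]]
      rw [ih (i + 1) true sd hrec, hzip]
      rcases Nat.eq_zero_or_pos n with hn | hn
      · subst hn
        have : s.drop (i + 2) = [] := List.drop_eq_nil_of_le (by omega)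
        simp [this, le_of_lt hgt, hgt]
      · simp [Nat.pos_iff_ne_zero.mp hn, le_of_lt hgt, hgt]
    · by_cases heq : s[i] = s[i + 1]
      · rw [show mdhLoopA s i (n + 1) d sd = mdhLoopA s (i + 1) n true false by
          simp [mdhLoopA, hg1, hg2, heq]]
        rw [ih (i + 1) true false hrec, hzip]
        rcases Nat.eq_zero_or_pos n with hn | hn
        · subst hn
          have : s.drop (i + 2) = [] := List.drop_eq_nil_of_le (by omega)
          simp [this, heq]
        · simp [Nat.pos_iff_ne_zero.mp hn, heq]
      · have hlt : s[i] < s[i + 1] := lt_of_le_of_ne (le_of_not_gt hgt) heq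
        rw [show mdhLoopA s i (n + 1) d sd = (false, false) by
          simp [mdhLoopA, hg1, hg2, not_lt_of_gt hlt, heq]]
        rw [hzip]
        simp [not_le_of_gt hlt, not_lt_of_gt hlt]

-- ===== VERDICT (by name: the statement is the Claim_ definition above) =====
theorem monotonicity_down_handler_spec : Claim_equal_monotonicity_down_handler := by
  intro s _
  unfold Spec_monotonicity_down_handler monotonicity_down_handler monotonicity_down_handler_alt
  rcases s with _ | ⟨a, t⟩
  · simp [mdhLoopA]
  rcases t with _ | ⟨b, t⟩
  · simp [mdhLoopA]
  have key := mdhLoopA_spec (a :: b :: t) (t.length + 1) 0 false true (by simp)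
  simp only [List.length_cons, Nat.add_sub_cancel, List.drop_zero, List.drop_one] at key ⊢
  simp [key]
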